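-- pv_equiv track=rewrite | github.com/LucasFASouza/combo-simulator | ocelote helm/main.py | simulate_turns
-- ===== SOURCE A (Python) =====
-- def apply_algorithm(ocelots, cats):
--     ocelots += 1
--     cats += ocelots + ocelots ** 2
--     ocelots *= 2
--
--     return ocelots, cats
--
-- def simulate_turns(turns):
--     ocelots = 1
--     cats = 0
--
--     ocelots_list = [ocelots]
--     cats_list = [cats]
--
--     for _ in range(turns):
--         ocelots, cats = apply_algorithm(ocelots, cats)
--         ocelots_list.append(ocelots)
--         cats_list.append(cats)
--
--     return ocelots_list, cats_list
-- ===== SOURCE B (Python) =====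
-- def simulate_turns(turns):
--     n = max(turns, 0)
--     # closed form: ocelots after k turns = 3*2**k - 2
--     ocelots_list = [3 * 2 ** k - 2 for k in range(n + 1)]
--     cats_list = [0]
--     c = 0
--     for k in range(1, n + 1):
--         m = ocelots_list[k] // 2  # ocelot count after increment, before doubling
--         c += m + m * m
--         cats_list.append(c)
--     return ocelots_list, cats_list
-- ===== Notes on version B (the rewrite author's own statement) =====
-- stated objective: alternative
-- what changed: Replaces the single stateful simulation loop with a closed-form comprehension for ocelots (3*2**k - 2) plus a separate accumulating pass for cats derived from the ocelot list.
import Mathlib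
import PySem

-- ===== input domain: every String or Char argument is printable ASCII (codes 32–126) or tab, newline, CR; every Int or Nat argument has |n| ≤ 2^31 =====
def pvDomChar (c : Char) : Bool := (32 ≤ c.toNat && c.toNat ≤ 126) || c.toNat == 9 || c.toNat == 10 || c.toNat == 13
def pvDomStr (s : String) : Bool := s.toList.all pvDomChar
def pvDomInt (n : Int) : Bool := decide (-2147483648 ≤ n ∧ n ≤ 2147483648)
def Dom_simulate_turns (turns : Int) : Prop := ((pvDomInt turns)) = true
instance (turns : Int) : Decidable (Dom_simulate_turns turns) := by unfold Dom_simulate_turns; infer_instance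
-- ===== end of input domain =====

-- B replaces A's single stateful simulation loop by a closed-form comprehension for the
-- ocelot counts plus a separate accumulating pass for the cat counts (objective: alternative).

-- ===== PORT A =====
def apply_algorithm (ocelots cats : Int) : Int × Int :=
  let ocelots := ocelots + 1
  let cats := cats + (ocelots + ocelots ^ 2)
  let ocelots := ocelots * 2
  (ocelots, cats)

def simulate_turns (turns : Int) : List Int × List Int :=
  ((PySem.List.pyRange 0 turns 1).foldl
    (fun (st : (Int × Int) × (List Int × List Int)) _ =>
      let oc := apply_algorithm st.1.1 st.1.2
      (oc, (st.2.1 ++ [oc.1], st.2.2 ++ [oc.2])))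
    ((1, 0), ([1], [0]))).2

-- ===== PORT B =====
def simulate_turns_alt (turns : Int) : List Int × List Int :=
  let n := max turns 0
  let ocelots_list := (PySem.List.pyRange 0 (n + 1) 1).map (fun k => 3 * 2 ^ k.toNat - 2)
  -- Source B indexes ocelots_list[k] with k in range(1, n+1), always in range, so pyGetD is exact here
  let r := (PySem.List.pyRange 1 (n + 1) 1).foldl
    (fun (st : Int × List Int) k =>
      let m := PySem.Int.floordiv (PySem.List.pyGetD ocelots_list k 0) 2
      (st.1 + (m + m * m), st.2 ++ [st.1 + (m + m * m)]))
    (0, [0])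
  (ocelots_list, r.2)

-- ===== PRECONDITION & SPEC =====
def Spec_simulate_turns (turns : Int) (out : List Int × List Int) : Prop := out = simulate_turns_alt turns
instance (turns : Int) (out : List Int × List Int) : Decidable (Spec_simulate_turns turns out) := by unfold Spec_simulate_turns; infer_instance

-- ===== CLAIM (what is proved, stated in full; the proofs are below) =====
def Claim_equal_simulate_turns : Prop := ∀ (turns : Int), Dom_simulate_turns turns → Spec_simulate_turns turns (simulate_turns turns)

-- ===== LEMMAS AND PROOFS =====

-- reference cat totals: C n = cats after n turns
def pvC : Nat → Int
  | 0 => 0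
  | n + 1 => pvC n + ((3 * 2 ^ n - 1) + (3 * 2 ^ n - 1) ^ 2)

def pvClist : Nat → List Int
  | 0 => [0]
  | n + 1 => pvClist n ++ [pvC (n + 1)]

def pvOlist (n : Nat) : List Int :=
  (PySem.List.pyRange 0 ((n : Int) + 1) 1).map (fun k => 3 * 2 ^ k.toNat - 2)

lemma pvOlist_succ (n : Nat) :
    pvOlist (n + 1) = pvOlist n ++ [3 * 2 ^ (n + 1) - 2] := by
  unfold pvOlist
  rw [show (((n + 1 : Nat) : Int) + 1) = ((n : Int) + 1) + 1 by push_cast; ring,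
      PySem.List.pyRange_one_succ_right (by positivity), List.map_append]
  simp

lemma pvA_fold (n : Nat) :
    (PySem.List.pyRange 0 (n : Int) 1).foldl
      (fun (st : (Int × Int) × (List Int × List Int)) _ =>
        let oc := apply_algorithm st.1.1 st.1.2
        (oc, (st.2.1 ++ [oc.1], st.2.2 ++ [oc.2])))
      ((1, 0), ([1], [0]))
    = ((3 * 2 ^ n - 2, pvC n), (pvOlist n, pvClist n)) := by
  induction n with
  | zero =>
    rw [PySem.List.pyRange_one_eq_nil (by omega)]
    simp [pvC, pvClist, pvOlist]
    decide
  | succ n ih =>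
    rw [show (((n + 1 : Nat)) : Int) = (n : Int) + 1 by push_cast; ring,
        PySem.List.pyRange_one_succ_right (by positivity), List.foldl_append, ih]
    simp only [List.foldl_cons, List.foldl_nil]
    rw [pvOlist_succ]
    simp only [pvC, pvClist, apply_algorithm]
    refine Prod.ext (Prod.ext ?_ ?_) (Prod.ext ?_ ?_) <;> simp <;> ring_nf

lemma pv_floordiv (j : Nat) (hj : 1 ≤ j) :
    PySem.Int.floordiv (3 * 2 ^ j - 2) 2 = 3 * 2 ^ (j - 1) - 1 := by
  obtain ⟨i, rfl⟩ : ∃ i, j = i + 1 := ⟨j - 1, by omega⟩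
  have h : (3 * 2 ^ (i + 1) - 2 : Int) = 2 * (3 * 2 ^ i - 1) := by ring
  rw [h]
  simp only [PySem.Int.floordiv, Nat.add_sub_cancel]
  rw [Int.mul_fdiv_cancel_left _ (by norm_num)]

lemma pvB_fold (n : Nat) (f : Int × List Int → Int → Int × List Int)
    (hf : ∀ st k, 1 ≤ k → k < (n : Int) + 1 →
      f st k = (st.1 + ((3 * 2 ^ (k.toNat - 1) - 1) + (3 * 2 ^ (k.toNat - 1) - 1) ^ 2),
                st.2 ++ [st.1 + ((3 * 2 ^ (k.toNat - 1) - 1) + (3 * 2 ^ (k.toNat - 1) - 1) ^ 2)])) :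
    (PySem.List.pyRange 1 ((n : Int) + 1) 1).foldl f (0, [0]) = (pvC n, pvClist n) := by
  induction n with
  | zero =>
    rw [PySem.List.pyRange_one_eq_nil (by omega)]
    simp [pvC, pvClist]
  | succ n ih =>
    rw [show (((n + 1 : Nat)) : Int) + 1 = ((n : Int) + 1) + 1 by push_cast; ring,
        PySem.List.pyRange_one_succ_right (by omega), List.foldl_append,
        ih (fun st k h1 h2 => hf st k h1 (by push_cast; omega))]
    simp only [List.foldl_cons, List.foldl_nil]
    rw [hf _ ((n : Int) + 1) (by omega) (by push_cast; omega)]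
    have ht : (((n : Int) + 1)).toNat - 1 = n := by omega
    rw [ht]
    simp only [pvC, pvClist]

lemma pv_main (n : Nat) : simulate_turns (n : Int) = simulate_turns_alt (n : Int) := by
  unfold simulate_turns simulate_turns_alt
  simp only [show max (n : Int) 0 = (n : Int) by omega]
  rw [pvA_fold]
  refine Prod.ext rfl ?_
  show pvClist n = _
  rw [pvB_fold n _ ?_]
  · intro st k h1 h2
    rw [show ((PySem.List.pyRange 0 ((n : Int) + 1) 1).map (fun k => 3 * 2 ^ k.toNat - 2))
          = pvOlist n from rfl]
    unfold pvOlist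
    rw [PySem.List.pyGetD_map_pyRange_of_nonneg _ _ _ _ (by omega) (by omega)]
    rw [pv_floordiv k.toNat (by omega)]
    ring_nf

-- ===== VERDICT (by name: the statement is the Claim_ definition above) =====
theorem simulate_turns_spec : Claim_equal_simulate_turns := by
  intro turns _
  unfold Spec_simulate_turns
  by_cases h : 0 ≤ turns
  · obtain ⟨n, rfl⟩ : ∃ n : Nat, turns = (n : Int) := ⟨turns.toNat, by omega⟩
    exact pv_main n
  · unfold simulate_turns simulate_turns_alt
    rw [PySem.List.pyRange_one_eq_nil (by omega), show max turns 0 = (0 : Int) by omega]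
    decide
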